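-- pv_equiv track=rewrite | github.com/cavanstewart/TuneSearch | search.py | _remove_punc
-- ===== SOURCE A (Python) =====
-- import string
--
-- _PUNCTUATION = frozenset(string.punctuation)
--
-- def _remove_punc(token):
--     """Removes punctuation from start/end of token."""
--     i = 0
--     j = len(token) - 1
--     idone = False
--     jdone = False
--     while i <= j and not (idone and jdone):
--         if token[i] in _PUNCTUATION and not idone:
--             i += 1
--         else:
--             idone = True
--         if token[j] in _PUNCTUATION and not jdone:
--             j -= 1
--         else:
--             jdone = True
--     return "" if i > j else token[i:(j+1)]
-- ===== SOURCE B (Python) =====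
-- import string
--
-- _PUNCTUATION = frozenset(string.punctuation)
--
-- def _remove_punc(token):
--     """Removes punctuation from start/end of token."""
--     chars = list(token)
--     while chars and chars[0] in _PUNCTUATION:
--         chars.pop(0)
--     while chars and chars[-1] in _PUNCTUATION:
--         chars.pop()
--     return "".join(chars)
-- ===== Notes on version B (the rewrite author's own statement) =====
-- stated objective: simpler
-- what changed: Replaces the interleaved two-pointer loop with idone/jdone completion flags by two independent strip loops over a char list (pop leading punctuation, then pop trailing punctuation), with no index arithmetic or flags.
import Mathlib
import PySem

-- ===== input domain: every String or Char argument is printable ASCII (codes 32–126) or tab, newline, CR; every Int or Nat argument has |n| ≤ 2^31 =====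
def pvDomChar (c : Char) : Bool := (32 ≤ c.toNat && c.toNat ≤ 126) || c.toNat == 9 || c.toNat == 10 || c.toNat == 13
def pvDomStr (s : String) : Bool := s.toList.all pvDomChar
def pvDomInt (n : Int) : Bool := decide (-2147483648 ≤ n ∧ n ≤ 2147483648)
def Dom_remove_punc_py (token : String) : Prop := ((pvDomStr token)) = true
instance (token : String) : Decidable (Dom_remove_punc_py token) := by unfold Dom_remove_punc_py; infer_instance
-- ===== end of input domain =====

-- B replaces A's interleaved two-pointer loop (with idone/jdone flags) by two independent
-- strip passes over the character list; objective: simpler.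

-- ===== PORT A =====
-- string.punctuation
def puncChars : List Char := "!\"#$%&'()*+,-./:;<=>?@[\\]^_`{|}~".toList

def isPunc (c : Char) : Bool := puncChars.contains c

-- the while loop of A; indices are always in range when read (i ≤ j, 0 ≤ i, j < len),
-- so pyGetD's default is never used
def loopA (cs : List Char) (i j : Int) (idone jdone : Bool) : Int × Int :=
  if i ≤ j ∧ ¬(idone = true ∧ jdone = true) then
    if isPunc (PySem.List.pyGetD cs i ' ') = true ∧ idone = false then
      if isPunc (PySem.List.pyGetD cs j ' ') = true ∧ jdone = false then
        loopA cs (i + 1) (j - 1) idone jdone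
      else
        loopA cs (i + 1) j idone true
    else
      if isPunc (PySem.List.pyGetD cs j ' ') = true ∧ jdone = false then
        loopA cs i (j - 1) true jdone
      else
        loopA cs i j true true
  else
    (i, j)
termination_by ((j - i + 2).toNat + (if idone then 0 else 1) + (if jdone then 0 else 1))
decreasing_by all_goals (cases idone <;> cases jdone <;> simp_all <;> omega)

def remove_punc_py (token : String) : String :=
  let cs := token.toList
  let p := loopA cs 0 ((cs.length : Int) - 1) false false
  if p.1 > p.2 then "" else String.mk (PySem.List.slice cs (some p.1) (some (p.2 + 1)))

-- ===== PORT B =====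
-- while chars and chars[0] in _PUNCTUATION: chars.pop(0)
def lstripP : List Char → List Char
  | [] => []
  | c :: t => if isPunc c then lstripP t else c :: t

-- while chars and chars[-1] in _PUNCTUATION: chars.pop()
def rstripP (cs : List Char) : List Char :=
  if h : cs = [] then []
  else if isPunc (cs.getLast h) then rstripP cs.dropLast else cs
termination_by cs.length
decreasing_by simp_all [List.length_dropLast]; exact List.length_pos_of_ne_nil h

def remove_punc_py_alt (token : String) : String :=
  String.mk (rstripP (lstripP token.toList))

-- ===== PRECONDITION & SPEC =====
def Spec_remove_punc_py (token : String) (out : String) : Prop := out = remove_punc_py_alt token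
instance (token : String) (out : String) : Decidable (Spec_remove_punc_py token out) := by unfold Spec_remove_punc_py; infer_instance

-- ===== CLAIM (what is proved, stated in full; the proofs are below) =====
def Claim_equal_remove_punc_py : Prop := ∀ (token : String), Dom_remove_punc_py token → Spec_remove_punc_py token (remove_punc_py token)

-- ===== LEMMAS AND PROOFS =====

lemma pyGetD_toNat (cs : List Char) (i : Int) (h0 : 0 ≤ i) (h1 : i < cs.length) :
    PySem.List.pyGetD cs i ' ' = cs.getD i.toNat ' ' := by
  rw [PySem.List.pyGetD_eq_getElem cs ' ' h0 h1]
  rw [List.getD_eq_getElem _ _ (by omega)]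

/-- `isPunc` transfers from `pyGetD` to `getD` for an in-range index. -/
lemma punc_at (cs : List Char) (i : Int) (h0 : 0 ≤ i) (h1 : i < (cs.length : Int)) :
    isPunc (PySem.List.pyGetD cs i ' ') = isPunc (cs.getD i.toNat ' ') := by
  rw [pyGetD_toNat cs i h0 h1]

/-- Postcondition of A's loop under its invariants. -/
lemma loopA_post (cs : List Char) (i j : Int) (idone jdone : Bool) :
    0 ≤ i → j < (cs.length : Int) →
    (∀ k : Nat, (k : Int) < i → isPunc (cs.getD k ' ') = true) →
    (∀ k : Nat, j < (k : Int) → k < cs.length → isPunc (cs.getD k ' ') = true) →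
    (idone = true → i ≤ j ∧ isPunc (cs.getD i.toNat ' ') = false) →
    (jdone = true → i ≤ j ∧ isPunc (cs.getD j.toNat ' ') = false) →
    0 ≤ (loopA cs i j idone jdone).1 ∧ (loopA cs i j idone jdone).2 < (cs.length : Int) ∧
    (∀ k : Nat, (k : Int) < (loopA cs i j idone jdone).1 → isPunc (cs.getD k ' ') = true) ∧
    (∀ k : Nat, (loopA cs i j idone jdone).2 < (k : Int) → k < cs.length → isPunc (cs.getD k ' ') = true) ∧
    ((loopA cs i j idone jdone).1 > (loopA cs i j idone jdone).2 ∨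
      ((loopA cs i j idone jdone).1 ≤ (loopA cs i j idone jdone).2 ∧
       isPunc (cs.getD (loopA cs i j idone jdone).1.toNat ' ') = false ∧
       isPunc (cs.getD (loopA cs i j idone jdone).2.toNat ' ') = false)) := by
  induction i, j, idone, jdone using loopA.induct cs with
  | case1 i j idone jdone h hci hcj ih =>
      intro hi hj hpre hsuf _ _
      have hiL : i < (cs.length : Int) := by omega
      have hjL : 0 ≤ j := by omega
      have hpi : isPunc (cs.getD i.toNat ' ') = true := by
        rw [← punc_at cs i hi hiL]; exact hci.1
      have hpj : isPunc (cs.getD j.toNat ' ') = true := by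
        rw [← punc_at cs j hjL hj]; exact hcj.1
      have hL : loopA cs i j idone jdone = loopA cs (i + 1) (j - 1) idone jdone := by
        rw [loopA, if_pos h, if_pos hci, if_pos hcj]
      rw [hL]
      apply ih (by omega) (by omega)
      · intro k hk
        by_cases hk' : (k : Int) < i
        · exact hpre k hk'
        · have : k = i.toNat := by omega
          rw [this]; exact hpi
      · intro k hk1 hk2
        by_cases hk' : j < (k : Int)
        · exact hsuf k hk' hk2
        · have : k = j.toNat := by omega
          rw [this]; exact hpj
      · intro hx; rw [hci.2] at hx; cases hx
      · intro hx; rw [hcj.2] at hx; cases hx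
  | case2 i j idone jdone h hci hcj ih =>
      intro hi hj hpre hsuf _ hjd
      have hiL : i < (cs.length : Int) := by omega
      have hjL : 0 ≤ j := by omega
      have hpi : isPunc (cs.getD i.toNat ' ') = true := by
        rw [← punc_at cs i hi hiL]; exact hci.1
      have hpj : isPunc (cs.getD j.toNat ' ') = false := by
        cases hb : jdone with
        | true => exact (hjd hb).2
        | false =>
            rw [← punc_at cs j hjL hj]
            rcases (not_and_or.mp hcj) with hc | hc
            · exact Bool.not_eq_true _ ▸ (by simpa using hc)
            · exact absurd hb (by simpa using hc)
      have hij : i ≠ j := by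
        intro e
        rw [e] at hpi; rw [hpi] at hpj; cases hpj
      have hL : loopA cs i j idone jdone = loopA cs (i + 1) j idone true := by
        rw [loopA, if_pos h, if_pos hci, if_neg hcj]
      rw [hL]
      apply ih (by omega) (by omega)
      · intro k hk
        by_cases hk' : (k : Int) < i
        · exact hpre k hk'
        · have : k = i.toNat := by omega
          rw [this]; exact hpi
      · exact hsuf
      · intro hx; rw [hci.2] at hx; cases hx
      · intro _; exact ⟨by omega, hpj⟩
  | case3 i j idone jdone h hci hcj ih =>
      intro hi hj hpre hsuf hid _
      have hiL : i < (cs.length : Int) := by omega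
      have hjL : 0 ≤ j := by omega
      have hpj : isPunc (cs.getD j.toNat ' ') = true := by
        rw [← punc_at cs j hjL hj]; exact hcj.1
      have hpi : isPunc (cs.getD i.toNat ' ') = false := by
        cases hb : idone with
        | true => exact (hid hb).2
        | false =>
            rw [← punc_at cs i hi hiL]
            rcases (not_and_or.mp hci) with hc | hc
            · exact Bool.not_eq_true _ ▸ (by simpa using hc)
            · exact absurd hb (by simpa using hc)
      have hij : i ≠ j := by
        intro e
        rw [e] at hpi; rw [hpj] at hpi; cases hpi
      have hL : loopA cs i j idone jdone = loopA cs i (j - 1) true jdone := by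
        rw [loopA, if_pos h, if_neg hci, if_pos hcj]
      rw [hL]
      apply ih hi (by omega)
      · exact hpre
      · intro k hk1 hk2
        by_cases hk' : j < (k : Int)
        · exact hsuf k hk' hk2
        · have : k = j.toNat := by omega
          rw [this]; exact hpj
      · intro _; exact ⟨by omega, hpi⟩
      · intro hx; rw [hcj.2] at hx; cases hx
  | case4 i j idone jdone h hci hcj ih =>
      intro hi hj hpre hsuf hid hjd
      have hiL : i < (cs.length : Int) := by omega
      have hjL : 0 ≤ j := by omega
      have hpi : isPunc (cs.getD i.toNat ' ') = false := by
        cases hb : idone with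
        | true => exact (hid hb).2
        | false =>
            rw [← punc_at cs i hi hiL]
            rcases (not_and_or.mp hci) with hc | hc
            · exact Bool.not_eq_true _ ▸ (by simpa using hc)
            · exact absurd hb (by simpa using hc)
      have hpj : isPunc (cs.getD j.toNat ' ') = false := by
        cases hb : jdone with
        | true => exact (hjd hb).2
        | false =>
            rw [← punc_at cs j hjL hj]
            rcases (not_and_or.mp hcj) with hc | hc
            · exact Bool.not_eq_true _ ▸ (by simpa using hc)
            · exact absurd hb (by simpa using hc)
      have hL : loopA cs i j idone jdone = loopA cs i j true true := by
        rw [loopA, if_pos h, if_neg hci, if_neg hcj]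
      rw [hL]
      apply ih hi hj hpre hsuf
      · intro _; exact ⟨h.1, hpi⟩
      · intro _; exact ⟨h.1, hpj⟩
  | case5 i j idone jdone h =>
      intro hi hj hpre hsuf hid hjd
      have hL : loopA cs i j idone jdone = (i, j) := by
        rw [loopA, if_neg h]
      rw [hL]
      refine ⟨hi, hj, hpre, hsuf, ?_⟩
      by_cases hij : i ≤ j
      · push_neg at h
        obtain ⟨hd1, hd2⟩ := h hij
        exact Or.inr ⟨hij, (hid hd1).2, (hjd hd2).2⟩
      · exact Or.inl (by omega)

lemma lstrip_all (cs : List Char) (h : ∀ c ∈ cs, isPunc c = true) : lstripP cs = [] := by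
  induction cs with
  | nil => rfl
  | cons c t ih =>
      simp only [lstripP, h c (by simp)]
      exact ih (fun x hx => h x (by simp [hx]))

lemma lstrip_drop (cs : List Char) (m : Nat) (hm : m < cs.length)
    (hpre : ∀ k : Nat, k < m → isPunc (cs.getD k ' ') = true)
    (hm2 : isPunc (cs.getD m ' ') = false) : lstripP cs = cs.drop m := by
  induction cs generalizing m with
  | nil => simp at hm
  | cons c t ih =>
      cases m with
      | zero => simp only [List.getD_cons_zero] at hm2; simp [lstripP, hm2]
      | succ m =>
          have hc : isPunc c = true := by
            have := hpre 0 (Nat.succ_pos m); simpa using this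
          simp only [lstripP, hc, if_pos]
          simp only [List.drop_succ_cons]
          exact ih m (by simpa using hm)
            (fun k hk => by simpa using hpre (k + 1) (by omega))
            (by simpa using hm2)

lemma rstrip_take (n : Nat) : ∀ (cs : List Char), cs.length = n → ∀ (m : Nat), m < cs.length →
    (∀ k : Nat, m < k → k < cs.length → isPunc (cs.getD k ' ') = true) →
    isPunc (cs.getD m ' ') = false → rstripP cs = cs.take (m + 1) := by
  induction n with
  | zero => intro cs hcs m hm; omega
  | succ n ih =>
      intro cs hcs m hm hsuf hm2
      have hne : cs ≠ [] := by intro h; subst h; simp at hm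
      by_cases hlast : m = cs.length - 1
      · have hget : isPunc (cs.getLast hne) = false := by
          rw [List.getLast_eq_getElem]
          rw [List.getD_eq_getElem _ _ (by omega)] at hm2
          simpa [hlast] using hm2
        rw [rstripP]
        simp only [hne, dite_false, hget, Bool.false_eq_true, if_false]
        rw [List.take_of_length_le (by omega)]
      · have hp : isPunc (cs.getLast hne) = true := by
          rw [List.getLast_eq_getElem]
          have := hsuf (cs.length - 1) (by omega) (by omega)
          rw [List.getD_eq_getElem _ _ (by omega)] at this
          exact this
        rw [rstripP]
        simp only [hne, dite_false, hp, if_true]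
        have hlen : cs.dropLast.length = n := by simp [List.length_dropLast]; omega
        rw [ih cs.dropLast hlen m (by rw [hlen]; omega)
          (fun k hk1 hk2 => by
            rw [hlen] at hk2
            have hk3 : k < cs.dropLast.length := by rw [hlen]; omega
            rw [List.getD_eq_getElem _ _ hk3, List.getElem_dropLast]
            have := hsuf k hk1 (by omega)
            rw [List.getD_eq_getElem _ _ (by omega)] at this
            exact this)
          (by
            have hk3 : m < cs.dropLast.length := by rw [hlen]; omega
            rw [List.getD_eq_getElem _ _ hk3, List.getElem_dropLast]
            rw [List.getD_eq_getElem _ _ (by omega)] at hm2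
            exact hm2)]
        rw [List.dropLast_eq_take, List.take_take]
        congr 1
        omega

-- ===== VERDICT (by name: the statement is the Claim_ definition above) =====
theorem remove_punc_py_spec : Claim_equal_remove_punc_py := by
  intro token _
  unfold Spec_remove_punc_py remove_punc_py remove_punc_py_alt
  set cs := token.toList with hcs
  have h := loopA_post cs 0 ((cs.length : Int) - 1) false false (le_refl 0) (by omega)
    (by intro k hk; omega) (by intro k hk1 hk2; omega)
    (by intro h; cases h) (by intro h; cases h)
  set p := loopA cs 0 ((cs.length : Int) - 1) false false with hp
  obtain ⟨h1, h2, hpre, hsuf, hcase⟩ := h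
  rcases hcase with hgt | ⟨hle, hnpi, hnpj⟩
  · -- all characters are punctuation: both sides are ""
    rw [if_pos hgt]
    have hall : ∀ c ∈ cs, isPunc c = true := by
      intro c hc
      obtain ⟨k, hk, rfl⟩ := List.mem_iff_getElem.mp hc
      rw [← List.getD_eq_getElem cs ' ' hk]
      by_cases hki : (k : Int) < p.1
      · exact hpre k hki
      · exact hsuf k (by omega) hk
    rw [lstrip_all cs hall, rstripP]
    rfl
  · -- both pointers stopped at non-punctuation characters
    have hfalse : ¬ p.1 > p.2 := by omega
    rw [if_neg hfalse]
    set a := p.1.toNat with ha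
    set b := p.2.toNat with hb
    have hab : a ≤ b := by omega
    have hbn : b < cs.length := by omega
    have hB1 : lstripP cs = cs.drop a :=
      lstrip_drop cs a (by omega) (fun k hk => hpre k (by omega)) hnpi
    have hB2 : rstripP (cs.drop a) = (cs.drop a).take (b - a + 1) := by
      apply rstrip_take (cs.drop a).length (cs.drop a) rfl (b - a)
        (by simp [List.length_drop]; omega)
      · intro k hk1 hk2
        simp only [List.length_drop] at hk2
        have hk3 : k < (cs.drop a).length := by simp [List.length_drop]; omega
        rw [List.getD_eq_getElem _ _ hk3, List.getElem_drop]
        rw [← List.getD_eq_getElem cs ' ' (by omega)]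
        exact hsuf (a + k) (by omega) (by omega)
      · have hk3 : b - a < (cs.drop a).length := by simp [List.length_drop]; omega
        rw [List.getD_eq_getElem _ _ hk3, List.getElem_drop]
        rw [← List.getD_eq_getElem cs ' ' (by omega)]
        have : a + (b - a) = b := by omega
        rw [this]
        exact hnpj
    rw [hB1, hB2]
    have hA : PySem.List.slice cs (some p.1) (some (p.2 + 1)) = (cs.drop a).take (b - a + 1) := by
      rw [PySem.List.slice_toNat cs (by omega) (by omega)]
      congr 1
      omega
    rw [hA]
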